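-- pv_equiv track=rewrite | github.com/ski907/PET_Expansion | ERA5_GEV_toDSS_GEE.py | generate_alt_block_index
-- ===== SOURCE A (Python) =====
-- def generate_alt_block_index(duration):
--     # Calculate the starting point
--     start_index = duration // 2
--
--     # Initialize the alt_block_index with the starting index
--     alt_block_index = [start_index]
--
--     # Alternate incrementing and decrementing
--     for i in range(1, start_index + 1):
--         # Add next higher index if within duration
--         if start_index + i < duration:
--             alt_block_index.append(start_index + i)
--
--         # Add next lower index if it's non-negative
--         if start_index - i >= 0:
--             alt_block_index.append(start_index - i)
--
--     return alt_block_index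
-- ===== SOURCE B (Python) =====
-- def _interleave(upper, lower):
--     out = []
--     for u, l in zip(upper, lower):
--         out.append(u)
--         out.append(l)
--     n = min(len(upper), len(lower))
--     return out + upper[n:] + lower[n:]
--
--
-- def generate_alt_block_index(duration):
--     start = duration // 2
--     upper = list(range(start + 1, duration))
--     lower = list(range(start - 1, -1, -1))
--     return [start] + _interleave(upper, lower)
-- ===== Notes on version B (the rewrite author's own statement) =====
-- stated objective: alternative
-- what changed: B precomputes the ascending upper range and the descending lower range as two explicit lists and merges them by zipping (upper element before lower element, then the unmatched tail), instead of A's single counting loop that guards each append with bound checks.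
import Mathlib
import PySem

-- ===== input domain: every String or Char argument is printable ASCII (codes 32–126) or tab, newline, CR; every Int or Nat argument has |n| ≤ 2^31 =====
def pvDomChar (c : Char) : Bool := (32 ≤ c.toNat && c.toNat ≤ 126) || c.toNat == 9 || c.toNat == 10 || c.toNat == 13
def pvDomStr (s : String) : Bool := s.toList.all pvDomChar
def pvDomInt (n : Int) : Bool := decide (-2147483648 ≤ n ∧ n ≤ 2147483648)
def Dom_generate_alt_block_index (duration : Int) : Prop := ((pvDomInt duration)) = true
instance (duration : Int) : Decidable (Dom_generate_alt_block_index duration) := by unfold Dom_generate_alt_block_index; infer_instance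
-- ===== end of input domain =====

-- B rebuilds A's mid, mid+1, mid-1, … order by merging two precomputed ranges (upper ascending,
-- lower descending) instead of A's single guarded counting loop; alternative decomposition, same cost.


-- ===== PORT A =====
def generate_alt_block_index (duration : Int) : List Int :=
  let start_index := PySem.Int.floordiv duration 2
  (PySem.List.pyRange 1 (start_index + 1) 1).foldl
    (fun alt_block_index i =>
      let alt_block_index :=
        if start_index + i < duration then alt_block_index ++ [start_index + i]
        else alt_block_index
      if 0 ≤ start_index - i then alt_block_index ++ [start_index - i]
      else alt_block_index)
    [start_index]

-- ===== PORT B =====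
-- Source B's _interleave: zip loop, then the unmatched tails
def pvInterleaveB (upper lower : List Int) : List Int :=
  let out := (upper.zip lower).foldl (fun out p => out ++ [p.1, p.2]) []
  let n := min upper.length lower.length
  out ++ upper.drop n ++ lower.drop n

def generate_alt_block_index_alt (duration : Int) : List Int :=
  let start := PySem.Int.floordiv duration 2
  let upper := PySem.List.pyRange (start + 1) duration 1
  let lower := PySem.List.pyRange (start - 1) (-1) (-1)
  start :: pvInterleaveB upper lower

-- ===== PRECONDITION & SPEC =====
def Spec_generate_alt_block_index (duration : Int) (out : List Int) : Prop := out = generate_alt_block_index_alt duration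
instance (duration : Int) (out : List Int) : Decidable (Spec_generate_alt_block_index duration out) := by unfold Spec_generate_alt_block_index; infer_instance

-- ===== CLAIM (what is proved, stated in full; the proofs are below) =====
def Claim_equal_generate_alt_block_index : Prop := ∀ (duration : Int), Dom_generate_alt_block_index duration → Spec_generate_alt_block_index duration (generate_alt_block_index duration)

-- ===== LEMMAS AND PROOFS =====

-- recursive interleave, used only as a proof intermediary
def pvItl : List Int → List Int → List Int
  | [], l => l
  | u, [] => u
  | u0 :: us, l0 :: ls => u0 :: l0 :: pvItl us ls

lemma pvInterleaveB_aux (u : List Int) : ∀ (l : List Int) (acc : List Int),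
    ((u.zip l).foldl (fun out p => out ++ [p.1, p.2]) acc) ++
      u.drop (min u.length l.length) ++ l.drop (min u.length l.length)
      = acc ++ pvItl u l := by
  induction u with
  | nil => intro l acc; cases l <;> simp [pvItl]
  | cons u0 us ih =>
    intro l acc
    cases l with
    | nil => simp [pvItl]
    | cons l0 ls =>
      simp only [List.zip_cons_cons, List.foldl_cons, List.length_cons,
        Nat.succ_min_succ, List.drop_succ_cons, pvItl]
      rw [ih ls (acc ++ [u0, l0])]
      simp

lemma pvItl_nil_right (u : List Int) : pvItl u [] = u := by cases u <;> rfl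

lemma pvInterleaveB_eq (u l : List Int) : pvInterleaveB u l = pvItl u l := by
  unfold pvInterleaveB
  rw [pvInterleaveB_aux u l []]
  simp

lemma pvItl_take_succ (k : Nat) : ∀ (u l : List Int),
    pvItl (u.take (k + 1)) (l.take (k + 1))
      = pvItl (u.take k) (l.take k) ++ u[k]?.toList ++ l[k]?.toList := by
  induction k with
  | zero => intro u l; cases u <;> cases l <;> simp [pvItl]
  | succ k ih =>
    intro u l
    cases u with
    | nil => simp [pvItl, List.take_add_one]
    | cons u0 us =>
      cases l with
      | nil => simp [pvItl_nil_right, List.take_add_one]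
      | cons l0 ls => simp [pvItl, ih us ls]

-- loop invariant for A's fold, phrased over the first k iterations
lemma pvLoopInv (d s : Int) :
    ∀ k : Nat, k ≤ s.toNat →
    (((List.range k).map (fun j : Nat => (1 : Int) + (j : Int))).foldl
        (fun acc i =>
          let acc := if s + i < d then acc ++ [s + i] else acc
          if 0 ≤ s - i then acc ++ [s - i] else acc)
        [s])
      = s :: pvItl ((PySem.List.pyRange (s + 1) d 1).take k)
                   ((PySem.List.pyRange (s - 1) (-1) (-1)).take k) := by
  intro k hk
  induction k with
  | zero => simp [pvItl]
  | succ k ih =>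
    rw [List.range_succ, List.map_append, List.foldl_append,
      ih (Nat.le_of_succ_le hk)]
    simp only [List.map_cons, List.map_nil, List.foldl_cons, List.foldl_nil]
    rw [pvItl_take_succ]
    have hks : k < s.toNat := hk
    have hl : (PySem.List.pyRange (s - 1) (-1) (-1))[k]? = some (s - 1 - k) := by
      rw [PySem.List.pyRange_neg_one]
      have hkn : k < ((s - 1) - (-1)).toNat := by omega
      simp [hks]
    have hu : (PySem.List.pyRange (s + 1) d 1)[k]?
        = if s + (1 + (k : Int)) < d then some (s + 1 + k) else none := by
      rw [PySem.List.pyRange_one]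
      by_cases hc : s + (1 + (k : Int)) < d
      · have hkn : k < (d - (s + 1)).toNat := by omega
        simp [hkn, hc]
      · have hkn : ¬ k < (d - (s + 1)).toNat := by omega
        simp [hkn, hc]
    rw [hu, hl]
    have h2 : (0 : Int) ≤ s - (1 + (k : Int)) := by omega
    by_cases hc : s + (1 + (k : Int)) < d
    all_goals simp only [hc, if_pos, if_pos h2, Option.toList_some]
    all_goals simp
    all_goals try constructor
    all_goals try ring_nf
    all_goals omega

-- ===== VERDICT (by name: the statement is the Claim_ definition above) =====
theorem generate_alt_block_index_spec : Claim_equal_generate_alt_block_index := by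
  intro d _
  unfold Spec_generate_alt_block_index
  set s := PySem.Int.floordiv d 2 with hs
  show (PySem.List.pyRange 1 (s + 1) 1).foldl
      (fun acc i =>
        let acc := if s + i < d then acc ++ [s + i] else acc
        if 0 ≤ s - i then acc ++ [s - i] else acc)
      [s]
    = s :: pvInterleaveB (PySem.List.pyRange (s + 1) d 1)
          (PySem.List.pyRange (s - 1) (-1) (-1))
  have hb : s * 2 ≤ d ∧ d < (s + 1) * 2 := by
    have := (PySem.Int.floordiv_eq_iff_of_pos (a := d) (b := 2) (q := s) (by omega)).mp hs.symm
    omega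
  rw [pvInterleaveB_eq, PySem.List.pyRange_one (a := 1) (b := s + 1)]
  have harg : ((s + 1) - 1).toNat = s.toNat := by omega
  rw [harg]
  have := pvLoopInv d s s.toNat le_rfl
  rw [this]
  have hul : (PySem.List.pyRange (s + 1) d 1).length ≤ s.toNat := by
    rw [PySem.List.length_pyRange_one]; omega
  have hll : (PySem.List.pyRange (s - 1) (-1) (-1)).length ≤ s.toNat := by
    rw [PySem.List.length_pyRange_neg_one]; omega
  rw [List.take_of_length_le hul, List.take_of_length_le hll]
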